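-- pv_equiv track=rewrite | github.com/bigABG/prog-ABG | Bac Pratiques/Programmation/bac2021/cryptage.py | genere
-- ===== SOURCE A (Python) =====
-- def genere(nb):
--     mot = ""
--     while nb != 0:
--         R = nb % 3
--         if R == 0:
--             Y = "Ma"
--         elif R == 1:
--             Y = "Des"
--         else:
--             Y = "Son"
--         mot = Y + mot
--         nb = nb // 3
--     return mot
-- ===== SOURCE B (Python) =====
-- def genere(nb):
--     if nb == 0:
--         return ""
--     return genere(nb // 3) + ("Ma", "Des", "Son")[nb % 3]
-- ===== Notes on version B (the rewrite author's own statement) =====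
-- stated objective: simpler
-- what changed: Replaces the while-loop with a string accumulator prepended at each step by a direct recursion genere(nb//3) + word(nb%3) with a tuple digit lookup; no accumulator is threaded.
import Mathlib
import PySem

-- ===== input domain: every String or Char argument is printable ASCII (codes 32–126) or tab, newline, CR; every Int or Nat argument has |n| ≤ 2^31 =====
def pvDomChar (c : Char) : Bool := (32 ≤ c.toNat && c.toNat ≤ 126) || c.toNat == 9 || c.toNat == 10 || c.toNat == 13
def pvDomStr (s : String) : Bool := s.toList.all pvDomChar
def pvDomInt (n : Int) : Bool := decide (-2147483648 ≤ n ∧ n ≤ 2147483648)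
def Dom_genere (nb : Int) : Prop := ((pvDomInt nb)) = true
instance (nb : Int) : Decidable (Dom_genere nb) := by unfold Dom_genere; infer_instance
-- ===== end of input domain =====

-- B rewrites the while-loop as a direct recursion genere(nb//3) + word(nb%3) with a tuple lookup (simpler decomposition, same cost).


-- ===== PORT A =====
-- the while-loop, fuel-totalized (the fuel suffices for every nb ≥ 0; A diverges on nb < 0, excluded by Pre_)
def genereLoop : Nat → Int → String → String
  | 0, _, mot => mot
  | fuel + 1, nb, mot =>
    if nb = 0 then mot
    else
      let R := PySem.Int.mod nb 3
      let Y := if R = 0 then "Ma" else if R = 1 then "Des" else "Son"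
      genereLoop fuel (PySem.Int.floordiv nb 3) (Y ++ mot)

def genere (nb : Int) : String := genereLoop (nb.natAbs + 1) nb ""

-- ===== PORT B =====
-- the recursion of Source B, fuel-totalized with the same fuel bound (Source B overflows the stack on nb < 0, excluded by Pre_)
def genereAltGo : Nat → Int → String
  | 0, _ => ""
  | fuel + 1, nb =>
    if nb = 0 then ""
    else
      genereAltGo fuel (PySem.Int.floordiv nb 3) ++
        (if PySem.Int.mod nb 3 = 0 then "Ma" else if PySem.Int.mod nb 3 = 1 then "Des" else "Son")

def genere_alt (nb : Int) : String := genereAltGo (nb.natAbs + 1) nb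

-- ===== PRECONDITION & SPEC =====
-- Pre_ excludes nb < 0: there A's while-loop never terminates (nb // 3 stays at -1), so A returns on no excluded input.
def Pre_genere (nb : Int) : Prop := 0 ≤ nb
instance (nb : Int) : Decidable (Pre_genere nb) := by unfold Pre_genere; infer_instance
def pvWitness_genere : Int := (12345)

def Spec_genere (nb : Int) (out : String) : Prop := out = genere_alt nb
instance (nb : Int) (out : String) : Decidable (Spec_genere nb out) := by unfold Spec_genere; infer_instance

-- ===== CLAIM (what is proved, stated in full; the proofs are below) =====
def Claim_equal_genere : Prop := ∀ (nb : Int), Dom_genere nb → Pre_genere nb → Spec_genere nb (genere nb)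

-- ===== LEMMAS AND PROOFS =====

lemma genere_key : ∀ (fuel : Nat) (nb : Int) (mot : String),
    0 ≤ nb → nb < 3 ^ fuel →
    genereLoop fuel nb mot = genereAltGo fuel nb ++ mot := by
  intro fuel
  induction fuel with
  | zero =>
    intro nb mot h0 hlt
    have hz : nb = 0 := by omega
    simp [genereLoop, genereAltGo]
  | succ f ih =>
    intro nb mot h0 hlt
    by_cases hz : nb = 0
    · simp [genereLoop, genereAltGo, hz]
    · have h3 : PySem.Int.floordiv nb 3 = nb / 3 :=
        PySem.Int.floordiv_eq_ediv_of_pos (by omega)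
      have hm : PySem.Int.mod nb 3 = nb % 3 :=
        PySem.Int.mod_eq_emod_of_pos (by omega)
      have h0' : 0 ≤ nb / 3 := Int.ediv_nonneg h0 (by omega)
      have hlt' : nb / 3 < 3 ^ f := by
        have : nb < 3 * 3 ^ f := by
          have := hlt; rw [pow_succ] at this; omega
        omega
      simp only [genereLoop, genereAltGo, hz, h3, hm]
      rw [ih _ _ h0' hlt']
      simp [String.append_assoc]

lemma pow_fuel_big (n : Nat) : (n : Int) < 3 ^ (n + 1) := by
  induction n with
  | zero => norm_num
  | succ k ih =>
    have : (3:Int) ^ (k + 1) ≤ 3 ^ (k + 2) := by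
      have h1 : (1:Int) ≤ 3 ^ (k + 1) := one_le_pow₀ (by norm_num)
      calc (3:Int) ^ (k + 1) ≤ 3 ^ (k + 1) * 3 := by nlinarith
        _ = 3 ^ (k + 2) := by ring
    push_cast
    have h1 : (1:Int) ≤ 3 ^ (k + 1) := one_le_pow₀ (by norm_num)
    omega

-- ===== VERDICT (by name: the statement is the Claim_ definition above) =====
theorem genere_spec : Claim_equal_genere := by
  intro nb _ hpre
  unfold Spec_genere genere genere_alt
  have hbig : nb < 3 ^ (nb.natAbs + 1) := by
    have h1 := pow_fuel_big nb.natAbs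
    have h2 : (nb.natAbs : Int) = nb := Int.natAbs_of_nonneg hpre
    linarith
  rw [genere_key _ _ _ hpre hbig]
  simp
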